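-- pv_equiv track=rewrite | github.com/Aedwon/oppo-hlc-2026-bot | utils/challonge_client.py | find_participant_by_name
-- ===== SOURCE A (Python) =====
-- from typing import Optional
--
-- def find_participant_by_name(
--     cache: dict[int, str], name: str
-- ) -> Optional[tuple[int, str]]:
--     """Fuzzy-find a participant by name (case-insensitive substring)."""
--     name_lower = name.lower().strip()
--
--     # Exact match first
--     for pid, pname in cache.items():
--         if pname.lower() == name_lower:
--             return pid, pname
--
--     # Substring match
--     for pid, pname in cache.items():
--         if name_lower in pname.lower():
--             return pid, pname
--
--     return None
-- ===== SOURCE B (Python) =====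
-- from typing import Optional
--
-- def find_participant_by_name(
--     cache: dict[int, str], name: str
-- ) -> Optional[tuple[int, str]]:
--     """Fuzzy-find a participant by name (case-insensitive substring)."""
--     name_lower = name.lower().strip()
--     substring_match = None
--     for pid, pname in cache.items():
--         pl = pname.lower()
--         if pl == name_lower:
--             return pid, pname
--         if substring_match is None and name_lower in pl:
--             substring_match = (pid, pname)
--     return substring_match
-- ===== Notes on version B (the rewrite author's own statement) =====
-- stated objective: simpler
-- what changed: Replaces A's two full scans of the cache with a single pass that returns an exact match immediately and remembers only the first substring candidate in an accumulator.
import Mathlib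
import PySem

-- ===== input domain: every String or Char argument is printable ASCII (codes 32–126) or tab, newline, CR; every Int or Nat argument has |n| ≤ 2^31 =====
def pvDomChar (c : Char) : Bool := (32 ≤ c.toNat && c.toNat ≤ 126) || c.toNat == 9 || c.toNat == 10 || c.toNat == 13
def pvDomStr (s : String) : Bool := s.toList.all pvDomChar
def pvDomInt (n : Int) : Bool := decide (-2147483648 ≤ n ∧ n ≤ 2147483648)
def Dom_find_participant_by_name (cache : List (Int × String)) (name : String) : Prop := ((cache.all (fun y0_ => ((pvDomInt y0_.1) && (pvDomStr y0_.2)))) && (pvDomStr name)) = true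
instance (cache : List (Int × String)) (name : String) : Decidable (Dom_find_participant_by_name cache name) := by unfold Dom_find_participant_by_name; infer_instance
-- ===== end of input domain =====

-- B changes A's two separate scans into one pass with a first-substring accumulator (simpler, not faster).

-- ===== PORT A =====
-- first loop of A: exact (case-insensitive) match
def fpExactLoop (nl : String) : List (Int × String) → Option (Int × String)
  | [] => none
  | (pid, pname) :: rest =>
      if PySem.Str.lower pname = nl then some (pid, pname) else fpExactLoop nl rest

-- second loop of A: substring match
def fpSubLoop (nl : String) : List (Int × String) → Option (Int × String)
  | [] => none
  | (pid, pname) :: rest =>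
      if PySem.Str.isIn nl (PySem.Str.lower pname) then some (pid, pname) else fpSubLoop nl rest

def find_participant_by_name (cache : List (Int × String)) (name : String) : Option (Int × String) :=
  let name_lower := PySem.Str.strip (PySem.Str.lower name)
  match fpExactLoop name_lower cache with
  | some r => some r
  | none => fpSubLoop name_lower cache

-- ===== PORT B =====
-- B's single loop: return an exact match at once, remember the first substring match
def fpScan (nl : String) : List (Int × String) → Option (Int × String) → Option (Int × String)
  | [], sm => sm
  | (pid, pname) :: rest, sm =>
      let pl := PySem.Str.lower pname
      if pl = nl then some (pid, pname)
      else if sm.isNone && PySem.Str.isIn nl pl then fpScan nl rest (some (pid, pname))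
      else fpScan nl rest sm

def find_participant_by_name_alt (cache : List (Int × String)) (name : String) : Option (Int × String) :=
  let name_lower := PySem.Str.strip (PySem.Str.lower name)
  fpScan name_lower cache none

-- ===== PRECONDITION & SPEC =====
def Spec_find_participant_by_name (cache : List (Int × String)) (name : String) (out : Option (Int × String)) : Prop := out = find_participant_by_name_alt cache name
instance (cache : List (Int × String)) (name : String) (out : Option (Int × String)) : Decidable (Spec_find_participant_by_name cache name out) := by unfold Spec_find_participant_by_name; infer_instance

-- ===== CLAIM (what is proved, stated in full; the proofs are below) =====
def Claim_equal_find_participant_by_name : Prop := ∀ (cache : List (Int × String)) (name : String), Dom_find_participant_by_name cache name → Spec_find_participant_by_name cache name (find_participant_by_name cache name)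

-- ===== LEMMAS AND PROOFS =====
-- B's accumulating scan is A's exact loop with the substring loop (behind the accumulator) as fallback.
theorem fpScan_eq (nl : String) (l : List (Int × String)) (sm : Option (Int × String)) :
    fpScan nl l sm =
      match fpExactLoop nl l with
      | some r => some r
      | none => match sm with
                | some x => some x
                | none => fpSubLoop nl l := by
  induction l generalizing sm with
  | nil => cases sm <;> simp [fpScan, fpExactLoop, fpSubLoop]
  | cons p rest ih =>
      obtain ⟨pid, pname⟩ := p
      by_cases hx : PySem.Str.lower pname = nl
      · simp [fpScan, fpExactLoop, hx]
      · cases sm with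
        | some x =>
            simp [fpScan, fpExactLoop, hx, Option.isNone, ih]
        | none =>
            simp only [fpScan, fpExactLoop, fpSubLoop, hx, if_false, Option.isNone_none,
              Bool.true_and, ih]
            cases fpExactLoop nl rest <;> split <;> rfl

-- ===== VERDICT (by name: the statement is the Claim_ definition above) =====
theorem find_participant_by_name_spec : Claim_equal_find_participant_by_name := by
  intro cache name _
  unfold Spec_find_participant_by_name find_participant_by_name find_participant_by_name_alt
  rw [fpScan_eq]
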